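-- pv_equiv track=rewrite | github.com/bruna-barbosa/sudoku-solver | classes.py | get_row_fit
-- ===== SOURCE A (Python) =====
-- def get_row_fit(row):
--
--     result = 0
--     for index, value in enumerate(row):
--         for index_, value_ in enumerate(row):
--             if index == index_:
--                 pass
--             else:
--                 if (value == 0) | (value == value_):
--                     result += 1
--
--     return result
-- ===== SOURCE B (Python) =====
-- def get_row_fit(row):
--     n = len(row)
--     cnt = {}
--     for v in row:
--         cnt[v] = cnt.get(v, 0) + 1
--     result = 0
--     for v in row:
--         result += n - 1 if v == 0 else cnt[v] - 1
--     return result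
-- ===== Notes on version B (the rewrite author's own statement) =====
-- stated objective: faster
-- what changed: Replaced the quadratic all-pairs double loop by one pass that builds a frequency map and adds n-1 for a zero cell and count[value]-1 otherwise.
import Mathlib
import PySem

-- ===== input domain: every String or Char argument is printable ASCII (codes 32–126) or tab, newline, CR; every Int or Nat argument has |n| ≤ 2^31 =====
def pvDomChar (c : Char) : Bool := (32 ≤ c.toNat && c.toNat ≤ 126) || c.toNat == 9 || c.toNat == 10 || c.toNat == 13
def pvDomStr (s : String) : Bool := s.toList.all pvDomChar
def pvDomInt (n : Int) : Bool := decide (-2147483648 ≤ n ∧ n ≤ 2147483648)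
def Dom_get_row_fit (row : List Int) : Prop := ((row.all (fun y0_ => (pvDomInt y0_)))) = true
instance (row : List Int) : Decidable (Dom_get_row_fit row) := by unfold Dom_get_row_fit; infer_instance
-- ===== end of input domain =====

-- B replaces A's quadratic all-pairs double loop with a single-pass frequency map (objective: faster, asymptotic).

-- ===== PORT A =====
def get_row_fit (row : List Int) : Int :=
  (PySem.List.enumerate row).foldl (fun result iv =>
    (PySem.List.enumerate row).foldl (fun r jw =>
      if iv.1 = jw.1 then r
      else if iv.2 = 0 ∨ iv.2 = jw.2 then r + 1 else r) result) 0

-- ===== PORT B =====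
def get_row_fit_alt (row : List Int) : Int :=
  let n : Int := row.length
  let cnt := row.foldl (fun d v => d.insert v (d.getD v 0 + 1)) PySem.Dict.empty
  row.foldl (fun result v => result + (if v = 0 then n - 1 else cnt.getD v 0 - 1)) 0

-- ===== PRECONDITION & SPEC =====
def Spec_get_row_fit (row : List Int) (out : Int) : Prop := out = get_row_fit_alt row
instance (row : List Int) (out : Int) : Decidable (Spec_get_row_fit row out) := by unfold Spec_get_row_fit; infer_instance

-- ===== CLAIM (what is proved, stated in full; the proofs are below) =====
def Claim_equal_get_row_fit : Prop := ∀ (row : List Int), Dom_get_row_fit row → Spec_get_row_fit row (get_row_fit row)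

-- ===== LEMMAS AND PROOFS =====

-- A's inner loop body, rewritten as a single conditional increment
theorem inner_body_eq (i v : Int) :
    (fun (r : Int) (jw : Int × Int) =>
      if i = jw.1 then r
      else if v = 0 ∨ v = jw.2 then r + 1 else r)
    = (fun (r : Int) (jw : Int × Int) =>
      if ¬ i = jw.1 ∧ (v = 0 ∨ v = jw.2) then r + 1 else r) := by
  funext r jw
  by_cases h1 : i = jw.1 <;> by_cases h2 : v = 0 ∨ v = jw.2 <;> simp [h1, h2]

-- the count A's inner loop produces for one element (i, v) of the enumeration
theorem countP_aux (l : List (Int × Int)) (i v : Int)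
    (hmem : (i, v) ∈ l) (hnd : l.Pairwise (fun p q => p.1 ≠ q.1)) :
    l.countP (fun jw => decide (¬ i = jw.1 ∧ (v = 0 ∨ v = jw.2)))
    = (if v = 0 then l.length else l.countP (fun jw => decide (v = jw.2))) - 1 := by
  induction l with
  | nil => cases hmem
  | cons a t ih =>
    have hpw := List.pairwise_cons.mp hnd
    rcases List.mem_cons.mp hmem with h | h
    · -- head is (i, v): it never counts; every tail element has fst ≠ i
      subst h
      have htail : ∀ jw ∈ t, ¬ i = jw.1 := fun jw hjw => hpw.1 jw hjw
      by_cases hv : v = 0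
      · subst hv
        simp
        exact fun a b hab => htail (a, b) hab
      · simp [hv]
        exact List.countP_congr (fun jw hjw => by simp [htail jw hjw])
    · -- (i, v) is in the tail; the head's index differs from i
      have hne : ¬ i = a.1 := fun heq => hpw.1 (i, v) h heq.symm
      have ih' := ih h hpw.2
      by_cases hv : v = 0
      · subst hv
        have h1 : 1 ≤ t.length := List.length_pos_of_mem h
        rw [List.countP_cons, ih']
        simp [hne]
        omega
      · have h1 : 1 ≤ t.countP (fun jw => decide (v = jw.2)) :=
          List.countP_pos_iff.mpr ⟨(i, v), h, by simp⟩
        rw [List.countP_cons, ih']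
        by_cases hs : v = a.2
        · subst hs
          simp [hne, hv]
          omega
        · simp [hne, hs, hv]

theorem enum_pairwise (row : List Int) :
    (PySem.List.enumerate row).Pairwise (fun p q => p.1 ≠ q.1) :=
  List.Pairwise.imp (fun h => ne_of_lt h) (PySem.List.pairwise_lt_enumerate row 0)

theorem countP_snd (row : List Int) (v : Int) :
    (PySem.List.enumerate row).countP (fun jw => decide (v = jw.2)) = row.count v := by
  calc (PySem.List.enumerate row).countP (fun jw => decide (v = jw.2))
      = ((PySem.List.enumerate row).map (fun x => x.2)).countP (fun x => decide (v = x)) := by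
        rw [List.countP_map]; rfl
    _ = row.countP (fun x => decide (v = x)) := by rw [PySem.List.map_snd_enumerate]
    _ = row.count v := List.countP_congr (fun x _ => by
        rw [decide_eq_true_iff, beq_iff_eq]; exact eq_comm)

-- ===== VERDICT (by name: the statement is the Claim_ definition above) =====
theorem get_row_fit_spec : Claim_equal_get_row_fit := by
  intro row _
  unfold Spec_get_row_fit get_row_fit get_row_fit_alt
  simp only [PySem.Dict.getD_foldl_insert_add_one, PySem.Dict.getD_empty, zero_add]
  have hA : ∀ (init : Int) (iv : Int × Int),
      (PySem.List.enumerate row).foldl (fun r jw =>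
        if iv.1 = jw.1 then r
        else if iv.2 = 0 ∨ iv.2 = jw.2 then r + 1 else r) init
      = init + (((PySem.List.enumerate row).countP
          (fun jw => decide (¬ iv.1 = jw.1 ∧ (iv.2 = 0 ∨ iv.2 = jw.2)))) : Int) := by
    intro init iv
    rw [inner_body_eq iv.1 iv.2]
    exact PySem.List.foldl_ite_add_one _ _ _
  rw [PySem.List.foldl_congr_mem (PySem.List.enumerate row) _
      (fun (result : Int) (iv : Int × Int) =>
        result + (((PySem.List.enumerate row).countP
          (fun jw => decide (¬ iv.1 = jw.1 ∧ (iv.2 = 0 ∨ iv.2 = jw.2)))) : Int)) 0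
      (fun acc iv _ => hA acc iv)]
  rw [PySem.List.foldl_add, PySem.List.foldl_add]
  congr 1
  have hmap : ∀ iv ∈ PySem.List.enumerate row,
      (((PySem.List.enumerate row).countP
        (fun jw => decide (¬ iv.1 = jw.1 ∧ (iv.2 = 0 ∨ iv.2 = jw.2)))) : Int)
      = (if iv.2 = 0 then (row.length : Int) - 1 else (row.count iv.2 : Int) - 1) := by
    intro iv hiv
    have hc := countP_aux (PySem.List.enumerate row) iv.1 iv.2 (by simpa using hiv) (enum_pairwise row)
    have hlen : (PySem.List.enumerate row).length = row.length :=
      PySem.List.length_enumerate row 0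
    have hpos : 0 < row.length := by
      have h0 := List.length_pos_of_mem hiv
      rwa [hlen] at h0
    by_cases hv : iv.2 = 0
    · rw [hc]
      simp [hv, hlen]
      omega
    · have hmemv : 1 ≤ row.count iv.2 := by
        rw [List.one_le_count_iff]
        have hm : iv.2 ∈ (PySem.List.enumerate row).map (fun x => x.2) := List.mem_map_of_mem hiv
        rwa [PySem.List.map_snd_enumerate] at hm
      rw [hc]
      simp [hv, countP_snd]
      omega
  calc ((PySem.List.enumerate row).map (fun iv =>
          (((PySem.List.enumerate row).countP
            (fun jw => decide (¬ iv.1 = jw.1 ∧ (iv.2 = 0 ∨ iv.2 = jw.2)))) : Int))).sum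
      = ((PySem.List.enumerate row).map (fun iv =>
          if iv.2 = 0 then (row.length : Int) - 1 else (row.count iv.2 : Int) - 1)).sum := by
        rw [List.map_congr_left hmap]
    _ = (((PySem.List.enumerate row).map (fun x => x.2)).map (fun v =>
          if v = 0 then (row.length : Int) - 1 else (row.count v : Int) - 1)).sum := by
        rw [List.map_map]; rfl
    _ = (row.map (fun v =>
          if v = 0 then (row.length : Int) - 1 else (row.count v : Int) - 1)).sum := by
        rw [PySem.List.map_snd_enumerate]
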